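-- pv_equiv track=rewrite | github.com/GendySedysh/rubik | solver.py | step_5_PLL_patter_transfer
-- ===== SOURCE A (Python) =====
-- def step_5_PLL_patter_transfer(pattern):
--     tmp = ['O', 'G', 'R', 'B', 'O']
--     ret_list = []
--     ret_list.append(pattern)
--     for i in range(4):
--         ret_pattern = ''
--         for letter in ret_list[-1]:
--             if letter in tmp:
--                 i = tmp.index(letter)
--                 ret_pattern += tmp[i + 1]
--             else:
--                 ret_pattern += letter
--         ret_list.append(ret_pattern)
--     return ret_list
-- ===== SOURCE B (Python) =====
-- def step_5_PLL_patter_transfer(pattern):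
--     cycle = ['O', 'G', 'R', 'B']
--     pos = {c: i for i, c in enumerate(cycle)}
--     return [pattern] + [
--         ''.join(cycle[(pos[c] + k) % 4] if c in pos else c for c in pattern)
--         for k in range(1, 5)
--     ]
-- ===== Notes on version B (the rewrite author's own statement) =====
-- stated objective: faster
-- what changed: Each of the four variants is computed independently from the original pattern via a cycle-position dict and a modular offset, instead of A's chain where each variant is re-derived from the previous string with a list.index scan per character.
import Mathlib
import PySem

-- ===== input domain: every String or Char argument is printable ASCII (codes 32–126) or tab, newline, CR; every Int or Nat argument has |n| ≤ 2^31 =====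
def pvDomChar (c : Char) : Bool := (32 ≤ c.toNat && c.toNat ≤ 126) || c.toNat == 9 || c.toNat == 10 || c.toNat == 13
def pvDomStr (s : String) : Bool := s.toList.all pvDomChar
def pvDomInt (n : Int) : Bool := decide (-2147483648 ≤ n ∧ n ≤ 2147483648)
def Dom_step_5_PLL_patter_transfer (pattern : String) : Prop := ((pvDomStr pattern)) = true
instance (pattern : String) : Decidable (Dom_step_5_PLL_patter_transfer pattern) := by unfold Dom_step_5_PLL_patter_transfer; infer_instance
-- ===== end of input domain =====

-- B computes each of the four variants independently from the original pattern (cycle-position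
-- dict + modular offset) instead of A's chain where each variant is mapped from the previous one.

-- ===== PORT A =====
-- tmp = ['O', 'G', 'R', 'B', 'O']
def pvTmpA : List Char := ['O', 'G', 'R', 'B', 'O']

-- inner loop: ret_pattern accumulated over the letters of ret_list[-1]
def pvInnerA (s : List Char) : List Char :=
  s.foldl (fun ret_pattern letter =>
    if pvTmpA.contains letter then
      match PySem.List.index? pvTmpA letter with
      | some i => ret_pattern ++ (PySem.List.pyGet? pvTmpA (↑i + 1)).toList
      | none => ret_pattern          -- unreachable: contains = true yields an index
    else ret_pattern ++ [letter]) []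

def step_5_PLL_patter_transfer (pattern : String) : List String :=
  (List.range 4).foldl (fun ret_list _ =>
      ret_list ++ [String.ofList (pvInnerA (((PySem.List.pyGet? ret_list (-1)).getD "").toList))])
    [pattern]

-- ===== PORT B =====
def pvCycleB : List Char := ['O', 'G', 'R', 'B']
def pvPosB : PySem.Dict Char Nat := PySem.Dict.ofList pvCycleB.zipIdx

def pvCharB (k : Nat) (c : Char) : Char :=
  match PySem.Dict.get? pvPosB c with
  | some i => (pvCycleB[(i + k) % 4]?).getD c   -- index always in range
  | none => c

def step_5_PLL_patter_transfer_alt (pattern : String) : List String :=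
  [pattern] ++ (PySem.List.pyRange 1 5 1).map (fun k =>
    String.ofList (pattern.toList.map (pvCharB k.toNat)))

-- ===== PRECONDITION & SPEC =====
def Spec_step_5_PLL_patter_transfer (pattern : String) (out : List String) : Prop := out = step_5_PLL_patter_transfer_alt pattern
instance (pattern : String) (out : List String) : Decidable (Spec_step_5_PLL_patter_transfer pattern out) := by unfold Spec_step_5_PLL_patter_transfer; infer_instance

-- ===== CLAIM (what is proved, stated in full; the proofs are below) =====
def Claim_equal_step_5_PLL_patter_transfer : Prop := ∀ (pattern : String), Dom_step_5_PLL_patter_transfer pattern → Spec_step_5_PLL_patter_transfer pattern (step_5_PLL_patter_transfer pattern)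

-- ===== LEMMAS AND PROOFS =====

-- the one-step character map A performs (O→G, G→R, R→B, B→O, else identity)
def pvG (c : Char) : Char :=
  if c = 'O' then 'G' else if c = 'G' then 'R' else if c = 'R' then 'B'
  else if c = 'B' then 'O' else c

theorem pvG_other (c : Char) (h1 : c ≠ 'O') (h2 : c ≠ 'G') (h3 : c ≠ 'R') (h4 : c ≠ 'B') :
    pvG c = c := by
  simp [pvG, h1, h2, h3, h4]

theorem pvInnerA_step (acc : List Char) (c : Char) :
    (if pvTmpA.contains c then
      match PySem.List.index? pvTmpA c with
      | some i => acc ++ (PySem.List.pyGet? pvTmpA (↑i + 1)).toList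
      | none => acc
    else acc ++ [c]) = acc ++ [pvG c] := by
  by_cases h1 : c = 'O'
  · subst h1
    simp only [show pvTmpA.contains 'O' = true from by decide, if_true,
      show PySem.List.index? pvTmpA 'O' = some 0 from by decide,
      show PySem.List.pyGet? pvTmpA (((0 : Nat) : Int) + 1) = some 'G' from by decide,
      Option.toList, show pvG 'O' = 'G' from by decide]
  by_cases h2 : c = 'G'
  · subst h2
    simp only [show pvTmpA.contains 'G' = true from by decide, if_true,
      show PySem.List.index? pvTmpA 'G' = some 1 from by decide,
      show PySem.List.pyGet? pvTmpA (((1 : Nat) : Int) + 1) = some 'R' from by decide,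
      Option.toList, show pvG 'G' = 'R' from by decide]
  by_cases h3 : c = 'R'
  · subst h3
    simp only [show pvTmpA.contains 'R' = true from by decide, if_true,
      show PySem.List.index? pvTmpA 'R' = some 2 from by decide,
      show PySem.List.pyGet? pvTmpA (((2 : Nat) : Int) + 1) = some 'B' from by decide,
      Option.toList, show pvG 'R' = 'B' from by decide]
  by_cases h4 : c = 'B'
  · subst h4
    simp only [show pvTmpA.contains 'B' = true from by decide, if_true,
      show PySem.List.index? pvTmpA 'B' = some 3 from by decide,
      show PySem.List.pyGet? pvTmpA (((3 : Nat) : Int) + 1) = some 'O' from by decide,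
      Option.toList, show pvG 'B' = 'O' from by decide]
  have hc : pvTmpA.contains c = false := by
    simp [pvTmpA, List.contains_eq_mem, h1, h2, h3, h4]
  rw [hc]
  simp [pvG_other c h1 h2 h3 h4]

theorem pvInnerA_eq_map (s : List Char) : pvInnerA s = s.map pvG := by
  suffices h : ∀ acc, s.foldl (fun ret_pattern letter =>
    if pvTmpA.contains letter then
      match PySem.List.index? pvTmpA letter with
      | some i => ret_pattern ++ (PySem.List.pyGet? pvTmpA (↑i + 1)).toList
      | none => ret_pattern
    else ret_pattern ++ [letter]) acc = acc ++ s.map pvG by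
    simpa [pvInnerA] using h []
  induction s with
  | nil => intro acc; simp
  | cons c t ih =>
    intro acc
    simp only [List.foldl_cons, List.map_cons]
    rw [pvInnerA_step, ih, List.append_assoc]
    rfl

theorem pvPosB_none (c : Char) (h1 : c ≠ 'O') (h2 : c ≠ 'G') (h3 : c ≠ 'R') (h4 : c ≠ 'B') :
    PySem.Dict.get? pvPosB c = none := by
  have h : pvPosB.items = [('O', 0), ('G', 1), ('R', 2), ('B', 3)] := by decide
  have e1 : ('O' == c) = false := by simp; exact fun h => h1 h.symm
  have e2 : ('G' == c) = false := by simp; exact fun h => h2 h.symm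
  have e3 : ('R' == c) = false := by simp; exact fun h => h3 h.symm
  have e4 : ('B' == c) = false := by simp; exact fun h => h4 h.symm
  simp [PySem.Dict.get?, h, List.find?, e1, e2, e3, e4]

theorem pvCharB_eq_iter (k : Nat) (hk : 1 ≤ k ∧ k ≤ 4) (c : Char) :
    pvCharB k c = pvG^[k] c := by
  obtain ⟨hl, hu⟩ := hk
  by_cases h1 : c = 'O'
  · subst h1; interval_cases k <;> decide
  by_cases h2 : c = 'G'
  · subst h2; interval_cases k <;> decide
  by_cases h3 : c = 'R'
  · subst h3; interval_cases k <;> decide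
  by_cases h4 : c = 'B'
  · subst h4; interval_cases k <;> decide
  have hiter : pvG^[k] c = c := Function.iterate_fixed (pvG_other c h1 h2 h3 h4) k
  simp [pvCharB, pvPosB_none c h1 h2 h3 h4, hiter]

theorem pvPyRange_1_5 : PySem.List.pyRange 1 5 1 = [1, 2, 3, 4] := by decide

theorem step_5_PLL_patter_transfer_spec : Claim_equal_step_5_PLL_patter_transfer := by
  intro pattern _
  unfold Spec_step_5_PLL_patter_transfer
  have hA : step_5_PLL_patter_transfer pattern =
      [pattern,
       String.ofList (pattern.toList.map (pvG^[1])),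
       String.ofList (pattern.toList.map (pvG^[2])),
       String.ofList (pattern.toList.map (pvG^[3])),
       String.ofList (pattern.toList.map (pvG^[4]))] := by
    simp [step_5_PLL_patter_transfer, List.range_succ, pvInnerA_eq_map,
      PySem.List.pyGet?_neg_one,
      String.toList_ofList, List.map_map]
    exact ⟨rfl, rfl⟩
  have hB : step_5_PLL_patter_transfer_alt pattern =
      [pattern,
       String.ofList (pattern.toList.map (pvCharB 1)),
       String.ofList (pattern.toList.map (pvCharB 2)),
       String.ofList (pattern.toList.map (pvCharB 3)),
       String.ofList (pattern.toList.map (pvCharB 4))] := by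
    simp [step_5_PLL_patter_transfer_alt, pvPyRange_1_5]
  rw [hA, hB]
  have hmap : ∀ k, 1 ≤ k → k ≤ 4 →
      pattern.toList.map (pvCharB k) = pattern.toList.map (pvG^[k]) :=
    fun k hl hu => List.map_congr_left (fun c _ => pvCharB_eq_iter k ⟨hl, hu⟩ c)
  rw [hmap 1 (by omega) (by omega), hmap 2 (by omega) (by omega),
      hmap 3 (by omega) (by omega), hmap 4 (by omega) (by omega)]
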